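-- pv_equiv track=rewrite | github.com/allanbil214/bbpvp_tfidf | app_v2.py | expand_synonyms
-- ===== SOURCE A (Python) =====
-- def expand_synonyms(text):
--     synonym_map = {
--         'tata udara': 'ac tata udara',
--         'pemasangan': 'instalasi pasang',
--         'perbaikan': 'repair baik service',
--         'perawatan': 'maintenance rawat service',
--     }
--
--     for key, value in synonym_map.items():
--         if key in text:
--             text = text.replace(key, value)
--     return text
-- ===== SOURCE B (Python) =====
-- _SYNONYMS = [
--     ('tata udara', 'ac tata udara'),
--     ('pemasangan', 'instalasi pasang'),
--     ('perbaikan', 'repair baik service'),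
--     ('perawatan', 'maintenance rawat service'),
-- ]
--
-- def expand_synonyms(text):
--     # One left-to-right pass over the text driven by a phrase table,
--     # instead of four separate full-text replace scans.
--     out = []
--     i = 0
--     n = len(text)
--     while i < n:
--         for k, v in _SYNONYMS:
--             if text.startswith(k, i):
--                 out.append(v)
--                 i += len(k)
--                 break
--         else:
--             out.append(text[i])
--             i += 1
--     return ''.join(out)
-- ===== Notes on version B (the rewrite author's own statement) =====
-- stated objective: alternative
-- what changed: Replaced A's four sequential full-text scan-and-replace passes (one `in` test plus one str.replace per phrase) with a single left-to-right pass that consults a phrase table at each position, emitting the expansion and skipping the phrase on a match.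
import Mathlib
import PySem

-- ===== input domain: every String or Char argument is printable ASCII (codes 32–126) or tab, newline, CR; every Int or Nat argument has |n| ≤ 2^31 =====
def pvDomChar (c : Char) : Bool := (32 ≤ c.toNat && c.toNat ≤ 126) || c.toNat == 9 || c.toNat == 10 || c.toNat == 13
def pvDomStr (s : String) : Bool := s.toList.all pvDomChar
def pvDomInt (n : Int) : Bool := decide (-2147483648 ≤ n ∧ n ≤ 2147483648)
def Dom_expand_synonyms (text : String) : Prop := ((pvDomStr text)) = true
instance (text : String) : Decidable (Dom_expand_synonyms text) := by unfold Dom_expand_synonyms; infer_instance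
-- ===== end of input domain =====

-- B replaces A's four sequential full-text replace passes by a single left-to-right
-- scan driven by a phrase table (objective: alternative single-pass algorithm).

-- ===== PORT A =====
-- literal transliteration: the loop over the 4-entry literal dict is unrolled in
-- insertion order; each iteration is `if key in text: text = text.replace(key, value)`.
def expand_synonyms (text : String) : String :=
  let text := if PySem.Str.isIn "tata udara" text then PySem.Str.replace text "tata udara" "ac tata udara" else text
  let text := if PySem.Str.isIn "pemasangan" text then PySem.Str.replace text "pemasangan" "instalasi pasang" else text
  let text := if PySem.Str.isIn "perbaikan" text then PySem.Str.replace text "perbaikan" "repair baik service" else text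
  let text := if PySem.Str.isIn "perawatan" text then PySem.Str.replace text "perawatan" "maintenance rawat service" else text
  text

-- ===== PORT B =====
-- the phrase table _SYNONYMS of Source B, on char lists
def pvSyns : List (List Char × List Char) :=
  [("tata udara".toList, "ac tata udara".toList),
   ("pemasangan".toList, "instalasi pasang".toList),
   ("perbaikan".toList, "repair baik service".toList),
   ("perawatan".toList, "maintenance rawat service".toList)]

-- Source B's while-loop: at position i, try the table entries in order (text.startswith(k, i));
-- on a match emit v and advance by len(k), else emit the character and advance by 1.
-- `t.drop (k.length - 1)` is `(c :: t).drop k.length` for the nonempty keys (exact).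
def pvScan : List Char → List Char
  | [] => []
  | c :: t =>
    match pvSyns.find? (fun kv => kv.1.isPrefixOf (c :: t)) with
    | some (k, v) => v ++ pvScan (t.drop (k.length - 1))
    | none => c :: pvScan t
termination_by l => l.length
decreasing_by
  · simp only [List.length_drop, List.length_cons]; omega
  · simp

def expand_synonyms_alt (text : String) : String := String.ofList (pvScan text.toList)

-- ===== PRECONDITION & SPEC =====
def Spec_expand_synonyms (text : String) (out : String) : Prop := out = expand_synonyms_alt text
instance (text : String) (out : String) : Decidable (Spec_expand_synonyms text out) := by unfold Spec_expand_synonyms; infer_instance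

-- ===== CLAIM (what is proved, stated in full; the proofs are below) =====
def Claim_equal_expand_synonyms : Prop := ∀ (text : String), Dom_expand_synonyms text → Spec_expand_synonyms text (expand_synonyms text)

-- ===== LEMMAS AND PROOFS =====

-- structural recursion equivalent (for nonempty `o`) to PySem.Chars.replace's fuel loop
def rep1 (o n : List Char) : List Char → List Char
  | [] => []
  | c :: t =>
    if o.isPrefixOf (c :: t) then n ++ rep1 o n (t.drop (o.length - 1))
    else c :: rep1 o n t
termination_by l => l.length
decreasing_by
  · simp only [List.length_drop, List.length_cons]; omega
  · simp

theorem rep1_nil (o n : List Char) : rep1 o n [] = [] := by simp [rep1]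

theorem rep1_cons (o n : List Char) (c : Char) (t : List Char) :
    rep1 o n (c :: t) =
      if o.isPrefixOf (c :: t) then n ++ rep1 o n (t.drop (o.length - 1))
      else c :: rep1 o n t := by
  rw [rep1]

theorem rep1_go (o n : List Char) (ho : o ≠ []) :
    ∀ fuel l acc, l.length ≤ fuel →
      PySem.Chars.replace.go o n fuel l acc = acc.reverse ++ rep1 o n l := by
  intro fuel
  induction fuel with
  | zero =>
    intro l acc hl
    have : l = [] := List.length_eq_zero_iff.mp (Nat.le_zero.mp hl)
    subst this
    simp [PySem.Chars.replace.go, rep1_nil]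
  | succ fuel ih =>
    intro l acc hl
    match l with
    | [] => simp [PySem.Chars.replace.go, rep1_nil]
    | c :: t =>
      obtain ⟨a, o', rfl⟩ : ∃ a o', o = a :: o' := by
        cases o with
        | nil => exact absurd rfl ho
        | cons a o' => exact ⟨a, o', rfl⟩
      rw [PySem.Chars.replace.go, rep1_cons]
      by_cases hp : (a :: o').isPrefixOf (c :: t) = true
      · rw [if_pos hp, if_pos hp]
        have hdrop : (c :: t).drop (a :: o').length = t.drop o'.length := by simp
        have hlen : ((c :: t).drop (a :: o').length).length ≤ fuel := by
          simp only [List.length_drop, List.length_cons] at *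
          omega
        rw [ih _ _ hlen, hdrop]
        simp
      · rw [if_neg hp, if_neg hp]
        have hlen : t.length ≤ fuel := by simp at hl; omega
        rw [ih _ _ hlen]
        simp

theorem replace_eq_rep1 (o n s : List Char) (ho : o ≠ []) :
    PySem.Chars.replace s o n = rep1 o n s := by
  rw [PySem.Chars.replace]
  rw [if_neg (by simpa [List.isEmpty_iff] using ho)]
  simpa using rep1_go o n ho s.length s [] le_rfl

theorem rep1_of_not_infix (o n : List Char) :
    ∀ s, ¬ o <:+: s → rep1 o n s = s := by
  intro s
  induction s with
  | nil => intro _; exact rep1_nil o n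
  | cons c t ih =>
    intro h
    rw [rep1_cons, if_neg, ih (fun hi => h (List.infix_cons hi))]
    intro hb
    exact h (List.IsPrefix.isInfix (List.isPrefixOf_iff_prefix.mp hb))

theorem rep1_cons_neg (o n : List Char) (c : Char) (t : List Char) (h : ¬ o <+: (c :: t)) :
    rep1 o n (c :: t) = c :: rep1 o n t := by
  rw [rep1_cons, if_neg (fun hb => h (List.isPrefixOf_iff_prefix.mp hb))]

theorem rep1_pref (o n t : List Char) (ho : o ≠ []) :
    rep1 o n (o ++ t) = n ++ rep1 o n t := by
  obtain ⟨a, o', rfl⟩ : ∃ a o', o = a :: o' := by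
    cases o with
    | nil => exact absurd rfl ho
    | cons a o' => exact ⟨a, o', rfl⟩
  rw [show (a :: o') ++ t = a :: (o' ++ t) from rfl, rep1_cons,
      if_pos (List.isPrefixOf_iff_prefix.mpr (by exact List.prefix_append _ _))]
  simp

theorem rep1_append_safe (o n : List Char) :
    ∀ u t, (∀ i < u.length, ¬ (u.drop i <+: o) ∧ ¬ (o <+: u.drop i)) →
      rep1 o n (u ++ t) = u ++ rep1 o n t := by
  intro u
  induction u with
  | nil => intro t _; rfl
  | cons c u' ih =>
    intro t H
    have hnp : ¬ o <+: ((c :: u') ++ t) := by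
      intro h
      rcases List.prefix_or_prefix_of_prefix h (List.prefix_append (c :: u') t) with h' | h'
      · exact (H 0 (by simp)).2 (by simpa using h')
      · exact (H 0 (by simp)).1 (by simpa using h')
    rw [show (c :: u') ++ t = c :: (u' ++ t) from rfl, rep1_cons_neg o n c _ (by simpa using hnp),
        ih t (fun i hi => by simpa using H (i + 1) (by simpa using hi))]
    rfl

-- replacing `o` by `n` never creates a new front occurrence of a suffix `w` of `kk`
theorem rep1_noCreate (o n kk : List Char)
    (H : ∀ i < kk.length, ¬ (kk.drop i <+: n) ∧ ¬ (n <+: kk.drop i)) :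
    ∀ s w, w <:+ kk → w <+: rep1 o n s → w <+: s := by
  intro s
  induction s using rep1.induct o with
  | case1 => intro w _ h; rw [rep1_nil] at h; simpa using h
  | case2 c t hp ih =>
    -- o is a prefix of c :: t : rep1 starts with n, and no nonempty suffix of kk meets n
    intro w hsuf hpre
    rcases eq_or_ne w [] with rfl | hw
    · exact List.nil_prefix
    · exfalso
      rw [rep1_cons, if_pos hp] at hpre
      have hi : kk.drop (kk.length - w.length) = w ∧ kk.length - w.length < kk.length := by
        obtain ⟨u, rfl⟩ := hsuf
        have : 0 < w.length := List.length_pos_iff.mpr hw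
        constructor
        · simp
        · simp; omega
      rcases List.prefix_or_prefix_of_prefix hpre (List.prefix_append n _) with h' | h'
      · exact (H _ hi.2).1 (by rw [hi.1]; exact h')
      · exact (H _ hi.2).2 (by rw [hi.1]; exact h')
  | case3 c t hp ih =>
    intro w hsuf hpre
    rw [rep1_cons, if_neg hp] at hpre
    match w with
    | [] => exact List.nil_prefix
    | a :: w' =>
      obtain ⟨rfl, hw'⟩ := List.cons_prefix_cons.mp hpre
      have : w' <+: t :=
        ih w' (List.IsSuffix.trans (List.suffix_cons a w') hsuf) hw'
      exact List.cons_prefix_cons.mpr ⟨rfl, this⟩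

theorem rep1_noCreate_cons (o n kk : List Char)
    (H : ∀ i < kk.length, ¬ (kk.drop i <+: n) ∧ ¬ (n <+: kk.drop i))
    (c : Char) (t : List Char) (h : kk <+: (c :: rep1 o n t)) : kk <+: (c :: t) := by
  match kk with
  | [] => exact List.nil_prefix
  | a :: kk' =>
    obtain ⟨rfl, hk⟩ := List.cons_prefix_cons.mp h
    exact List.cons_prefix_cons.mpr
      ⟨rfl, rep1_noCreate o n (a :: kk') H t kk' (List.suffix_cons a kk') hk⟩

theorem pvScan_nil : pvScan [] = [] := by rw [pvScan]

theorem pvScan_cons (c : Char) (t : List Char) :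
    pvScan (c :: t) =
      match pvSyns.find? (fun kv => kv.1.isPrefixOf (c :: t)) with
      | some (k, v) => v ++ pvScan (t.drop (k.length - 1))
      | none => c :: pvScan t := by
  rw [pvScan]

theorem pvScan_k1 (t : List Char) :
    pvScan ("tata udara".toList ++ t) = "ac tata udara".toList ++ pvScan t := by
  rw [show "tata udara".toList ++ t = 't' :: ("ata udara".toList ++ t) from rfl, pvScan_cons]
  simp [pvSyns, List.isPrefixOf]

theorem pvScan_k2 (t : List Char) :
    pvScan ("pemasangan".toList ++ t) = "instalasi pasang".toList ++ pvScan t := by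
  rw [show "pemasangan".toList ++ t = 'p' :: ("emasangan".toList ++ t) from rfl, pvScan_cons]
  simp [pvSyns, List.isPrefixOf]

theorem pvScan_k3 (t : List Char) :
    pvScan ("perbaikan".toList ++ t) = "repair baik service".toList ++ pvScan t := by
  rw [show "perbaikan".toList ++ t = 'p' :: ("erbaikan".toList ++ t) from rfl, pvScan_cons]
  simp [pvSyns, List.isPrefixOf]

theorem pvScan_k4 (t : List Char) :
    pvScan ("perawatan".toList ++ t) = "maintenance rawat service".toList ++ pvScan t := by
  rw [show "perawatan".toList ++ t = 'p' :: ("erawatan".toList ++ t) from rfl, pvScan_cons]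
  simp [pvSyns, List.isPrefixOf]

theorem pvScan_none (c : Char) (t : List Char)
    (h1 : ¬ "tata udara".toList <+: (c :: t)) (h2 : ¬ "pemasangan".toList <+: (c :: t))
    (h3 : ¬ "perbaikan".toList <+: (c :: t)) (h4 : ¬ "perawatan".toList <+: (c :: t)) :
    pvScan (c :: t) = c :: pvScan t := by
  rw [pvScan_cons]
  have e : pvSyns.find? (fun kv => kv.1.isPrefixOf (c :: t)) = none := by
    apply List.find?_eq_none.mpr
    intro kv hkv
    simp only [pvSyns, List.mem_cons, List.not_mem_nil, or_false] at hkv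
    rcases hkv with rfl | rfl | rfl | rfl
    · exact fun hb => h1 (List.isPrefixOf_iff_prefix.mp hb)
    · exact fun hb => h2 (List.isPrefixOf_iff_prefix.mp hb)
    · exact fun hb => h3 (List.isPrefixOf_iff_prefix.mp hb)
    · exact fun hb => h4 (List.isPrefixOf_iff_prefix.mp hb)
  rw [e]

theorem pvMain : ∀ s : List Char,
    rep1 "perawatan".toList "maintenance rawat service".toList
      (rep1 "perbaikan".toList "repair baik service".toList
        (rep1 "pemasangan".toList "instalasi pasang".toList
          (rep1 "tata udara".toList "ac tata udara".toList s))) = pvScan s := by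
  suffices H : ∀ N s, s.length ≤ N →
      rep1 "perawatan".toList "maintenance rawat service".toList
        (rep1 "perbaikan".toList "repair baik service".toList
          (rep1 "pemasangan".toList "instalasi pasang".toList
            (rep1 "tata udara".toList "ac tata udara".toList s))) = pvScan s by
    exact fun s => H s.length s le_rfl
  intro N
  induction N with
  | zero =>
    intro s hs
    have : s = [] := List.length_eq_zero_iff.mp (Nat.le_zero.mp hs)
    subst this
    simp [rep1_nil, pvScan_nil]
  | succ N ih =>
    intro s hs
    match s with
    | [] => simp [rep1_nil, pvScan_nil]
    | c :: t =>
      by_cases h1 : "tata udara".toList <+: (c :: t)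
      · obtain ⟨t', ht⟩ := h1
        have hlen : t'.length ≤ N := by
          have := congrArg List.length ht
          simp at this hs; omega
        rw [← ht, rep1_pref _ _ _ (by decide),
            rep1_append_safe _ _ _ _ (by decide),
            rep1_append_safe _ _ _ _ (by decide),
            rep1_append_safe _ _ _ _ (by decide),
            pvScan_k1, ih t' hlen]
      · by_cases h2 : "pemasangan".toList <+: (c :: t)
        · obtain ⟨t', ht⟩ := h2
          have hlen : t'.length ≤ N := by
            have := congrArg List.length ht
            simp at this hs; omega
          rw [← ht, rep1_append_safe _ _ _ _ (by decide),
              rep1_pref _ _ _ (by decide),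
              rep1_append_safe _ _ _ _ (by decide),
              rep1_append_safe _ _ _ _ (by decide),
              pvScan_k2, ih t' hlen]
        · by_cases h3 : "perbaikan".toList <+: (c :: t)
          · obtain ⟨t', ht⟩ := h3
            have hlen : t'.length ≤ N := by
              have := congrArg List.length ht
              simp at this hs; omega
            rw [← ht, rep1_append_safe _ _ _ _ (by decide),
                rep1_append_safe _ _ _ _ (by decide),
                rep1_pref _ _ _ (by decide),
                rep1_append_safe _ _ _ _ (by decide),
                pvScan_k3, ih t' hlen]
          · by_cases h4 : "perawatan".toList <+: (c :: t)
            · obtain ⟨t', ht⟩ := h4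
              have hlen : t'.length ≤ N := by
                have := congrArg List.length ht
                simp at this hs; omega
              rw [← ht, rep1_append_safe _ _ _ _ (by decide),
                  rep1_append_safe _ _ _ _ (by decide),
                  rep1_append_safe _ _ _ _ (by decide),
                  rep1_pref _ _ _ (by decide),
                  pvScan_k4, ih t' hlen]
            · -- no key matches at this position; rep1 never creates one (rep1_noCreate_cons)
              have hlt : t.length ≤ N := by simp at hs; omega
              have h2' : ¬ "pemasangan".toList <+:
                  (c :: rep1 "tata udara".toList "ac tata udara".toList t) :=
                fun hk => h2 (rep1_noCreate_cons _ _ _ (by decide) c t hk)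
              have h3' : ¬ "perbaikan".toList <+:
                  (c :: rep1 "pemasangan".toList "instalasi pasang".toList
                    (rep1 "tata udara".toList "ac tata udara".toList t)) :=
                fun hk => h3 (rep1_noCreate_cons _ _ _ (by decide) c t
                  (rep1_noCreate_cons _ _ _ (by decide) c _ hk))
              have h4' : ¬ "perawatan".toList <+:
                  (c :: rep1 "perbaikan".toList "repair baik service".toList
                    (rep1 "pemasangan".toList "instalasi pasang".toList
                      (rep1 "tata udara".toList "ac tata udara".toList t))) :=
                fun hk => h4 (rep1_noCreate_cons _ _ _ (by decide) c t
                  (rep1_noCreate_cons _ _ _ (by decide) c _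
                    (rep1_noCreate_cons _ _ _ (by decide) c _ hk)))
              rw [rep1_cons_neg _ _ _ _ h1, rep1_cons_neg _ _ _ _ h2',
                  rep1_cons_neg _ _ _ _ h3', rep1_cons_neg _ _ _ _ h4',
                  pvScan_none c t h1 h2 h3 h4, ih t hlt]

-- ===== VERDICT (by name: the statement is the Claim_ definition above) =====
theorem expand_synonyms_spec : Claim_equal_expand_synonyms := by
  intro text _
  show expand_synonyms text = expand_synonyms_alt text
  have stage : ∀ (txt k v : String), k.toList ≠ [] →
      (if PySem.Str.isIn k txt then PySem.Str.replace txt k v else txt).toList =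
        rep1 k.toList v.toList txt.toList := by
    intro txt k v hk
    by_cases h : PySem.Str.isIn k txt
    · rw [if_pos h, PySem.Str.toList_replace, replace_eq_rep1 _ _ _ hk]
    · rw [if_neg h]
      have hinf : ¬ k.toList <:+: txt.toList := by
        have hb : PySem.Chars.isIn k.toList txt.toList = false := by
          simpa [PySem.Str.isIn] using h
        exact (PySem.Chars.isIn_eq_false_iff _ _).mp hb
      exact (rep1_of_not_infix _ _ _ hinf).symm
  apply String.toList_inj.mp
  simp only [expand_synonyms, expand_synonyms_alt, String.toList_ofList]
  rw [stage _ _ _ (by decide), stage _ _ _ (by decide), stage _ _ _ (by decide),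
      stage _ _ _ (by decide)]
  exact pvMain text.toList
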